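-- pv_equiv track=rewrite | github.com/Flashness123/Bachelorarbeit | main.py | has_keyword_followed_by_digit
-- ===== SOURCE A (Python) =====
-- def has_keyword_followed_by_digit(extracted_texts, keywords):
--     positions = []  # To hold positions of keywords
--     # Convert list of keywords to lowercase once to improve efficiency
--     keywords = [kw.lower() for kw in keywords]
--
--     # Iterate through the extracted texts to find keywords
--     for index, text in enumerate(extracted_texts):
--         text_lower = text.lower()
--         if any(kw in text_lower for kw in keywords):
--             positions.append((index, text_lower))
--
--     # Check for digits between the first and second keyword occurrences
--     if len(positions) >= 2:
--         # Extract the segment of texts between the first and second keyword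
--         segment = extracted_texts[positions[0][0] + 1:positions[1][0]]
--         # Check if any text in the segment contains a digit
--         for text in segment:
--             if any(char.isdigit() for char in text):
--                 return True
--
--     # Handle cases where only one keyword is found and then the list ends
--     elif len(positions) == 1:
--         # Check remaining texts after the first keyword for any digits
--         segment = extracted_texts[positions[0][0] + 1:]
--         for text in segment:
--             if any(char.isdigit() for char in text):
--                 return True
--
--     return False  # Return False if no suitable pattern is found
-- ===== SOURCE B (Python) =====
-- def has_keyword_followed_by_digit(extracted_texts, keywords):
--     kws = [kw.lower() for kw in keywords]
--
--     def bearing(text):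
--         tl = text.lower()
--         return any(kw in tl for kw in kws)
--
--     it = iter(extracted_texts)
--     for text in it:
--         if bearing(text):
--             break
--     else:
--         return False  # no keyword-bearing text at all
--     for text in it:
--         if bearing(text):
--             return False  # second keyword reached before any digit
--         if any(ch.isdigit() for ch in text):
--             return True
--     return False
-- ===== Notes on version B (the rewrite author's own statement) =====
-- stated objective: simpler
-- what changed: Replaces A's positions list built over a full enumeration plus index slicing with a single short-circuiting pass: find the first keyword-bearing text, then scan forward returning True at the first digit-bearing text and False at the next keyword-bearing text or the end; unlike A it stops scanning as soon as the answer is determined.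
import Mathlib
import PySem

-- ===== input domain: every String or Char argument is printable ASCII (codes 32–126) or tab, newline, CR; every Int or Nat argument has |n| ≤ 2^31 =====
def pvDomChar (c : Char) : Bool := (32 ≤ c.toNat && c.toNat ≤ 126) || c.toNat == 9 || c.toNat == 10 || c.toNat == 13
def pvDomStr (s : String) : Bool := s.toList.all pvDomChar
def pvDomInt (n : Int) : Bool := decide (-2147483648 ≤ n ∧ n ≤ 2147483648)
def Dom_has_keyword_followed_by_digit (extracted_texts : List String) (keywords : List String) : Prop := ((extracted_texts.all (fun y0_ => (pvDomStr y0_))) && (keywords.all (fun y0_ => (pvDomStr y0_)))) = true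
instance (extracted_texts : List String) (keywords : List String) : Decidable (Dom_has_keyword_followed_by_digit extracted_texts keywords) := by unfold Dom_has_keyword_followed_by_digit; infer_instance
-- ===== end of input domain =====

-- B replaces A's positions list plus index slicing with one short-circuiting pass (find first
-- keyword-bearing text, then scan forward until a digit or the next keyword); objective: simpler.

-- ===== PORT A =====
-- A's inner 'for text in segment: if any(char.isdigit() …): return True' loop
def aDigitLoop (segment : List String) : Bool :=
  match segment with
  | [] => false
  | t :: ts => if t.toList.any PySem.Chars.isdigit then true else aDigitLoop ts

def has_keyword_followed_by_digit (extracted_texts : List String) (keywords : List String) : Bool :=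
  let kws := keywords.map PySem.Str.lower
  let positions := (PySem.List.enumerate extracted_texts 0).foldl
    (fun acc it =>
      let text_lower := PySem.Str.lower it.2
      if kws.any (fun kw => PySem.Str.isIn kw text_lower) then acc ++ [(it.1, text_lower)] else acc)
    ([] : List (Int × String))
  match positions with
  | p0 :: p1 :: _ => aDigitLoop (PySem.List.slice extracted_texts (some (p0.1 + 1)) (some p1.1))
  | [p0] => aDigitLoop (PySem.List.slice extracted_texts (some (p0.1 + 1)) none)
  | [] => false

-- ===== PORT B =====
def bBearing (kws : List String) (t : String) : Bool :=
  let tl := PySem.Str.lower t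
  kws.any (fun kw => PySem.Str.isIn kw tl)

-- B's second loop: over the remaining iterator after the first keyword-bearing text
def bScan (kws : List String) : List String → Bool
  | [] => false
  | t :: ts =>
      if bBearing kws t then false
      else if t.toList.any PySem.Chars.isdigit then true
      else bScan kws ts

-- B's first loop: consume the iterator up to the first keyword-bearing text
def bFind (kws : List String) : List String → Bool
  | [] => false
  | t :: ts => if bBearing kws t then bScan kws ts else bFind kws ts

def has_keyword_followed_by_digit_alt (extracted_texts : List String) (keywords : List String) : Bool :=
  bFind (keywords.map PySem.Str.lower) extracted_texts

-- ===== PRECONDITION & SPEC =====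
def Spec_has_keyword_followed_by_digit (extracted_texts : List String) (keywords : List String) (out : Bool) : Prop := out = has_keyword_followed_by_digit_alt extracted_texts keywords
instance (extracted_texts : List String) (keywords : List String) (out : Bool) : Decidable (Spec_has_keyword_followed_by_digit extracted_texts keywords out) := by unfold Spec_has_keyword_followed_by_digit; infer_instance

-- ===== CLAIM (what is proved, stated in full; the proofs are below) =====
def Claim_equal_has_keyword_followed_by_digit : Prop := ∀ (extracted_texts : List String) (keywords : List String), Dom_has_keyword_followed_by_digit extracted_texts keywords → Spec_has_keyword_followed_by_digit extracted_texts keywords (has_keyword_followed_by_digit extracted_texts keywords)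

-- ===== LEMMAS AND PROOFS =====

-- A's positions loop is a filter-map of the enumeration
theorem positions_eq (kws : List String) (l : List String) :
    (PySem.List.enumerate l 0).foldl
      (fun acc it =>
        if (kws.any fun kw => PySem.Str.isIn kw (PySem.Str.lower it.2)) = true then
          acc ++ [(it.1, PySem.Str.lower it.2)]
        else acc) [] =
    ((PySem.List.enumerate l 0).filter (fun it => bBearing kws it.2)).map
      (fun it => (it.1, PySem.Str.lower it.2)) := by
  simpa [bBearing] using
    PySem.List.foldl_append_if (fun it : Int × String => bBearing kws it.2)
      (fun it : Int × String => (it.1, PySem.Str.lower it.2)) (PySem.List.enumerate l 0) []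

-- the filtered enumeration is empty when no text is keyword-bearing
theorem enumFilter_nil (kws : List String) (l : List String) (s : Int)
    (h : ∀ t ∈ l, bBearing kws t = false) :
    (PySem.List.enumerate l s).filter (fun it => bBearing kws it.2) = [] := by
  induction l generalizing s with
  | nil => simp [PySem.List.enumerate_nil]
  | cons t ts ih =>
      rw [PySem.List.enumerate_cons]
      simp only [List.filter_cons, h t (by simp)]
      exact ih (s + 1) (fun x hx => h x (by simp [hx]))

theorem dropWhile_head_false {α : Type} (p : α → Bool) (l : List α) (k : α) (rest : List α)
    (h : l.dropWhile p = k :: rest) : p k = false := by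
  induction l with
  | nil => simp [List.dropWhile] at h
  | cons t ts ih =>
      rw [List.dropWhile_cons] at h
      by_cases hp : p t = true
      · exact ih (by simpa [hp] using h)
      · simp only [hp, Bool.false_eq_true, if_false] at h
        injection h with h1 _
        subst h1
        simpa using hp

theorem bFind_all_false (kws : List String) (l : List String)
    (h : ∀ t ∈ l, bBearing kws t = false) : bFind kws l = false := by
  induction l with
  | nil => rfl
  | cons t ts ih =>
      simp only [bFind, h t (by simp)]
      simp only [Bool.false_eq_true, if_false]
      exact ih (fun x hx => h x (by simp [hx]))

theorem bFind_append (kws : List String) (pre l : List String)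
    (h : ∀ t ∈ pre, bBearing kws t = false) : bFind kws (pre ++ l) = bFind kws l := by
  induction pre with
  | nil => rfl
  | cons t ts ih =>
      simp only [List.cons_append, bFind, h t (by simp)]
      simp only [Bool.false_eq_true, if_false]
      exact ih (fun x hx => h x (by simp [hx]))

theorem bScan_all_false (kws : List String) (l : List String)
    (h : ∀ t ∈ l, bBearing kws t = false) : bScan kws l = aDigitLoop l := by
  induction l with
  | nil => rfl
  | cons t ts ih =>
      simp only [bScan, aDigitLoop, h t (by simp)]
      simp only [Bool.false_eq_true, if_false]
      rw [ih (fun x hx => h x (by simp [hx]))]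

theorem bScan_mid (kws : List String) (mid tail : List String) (k2 : String)
    (hmid : ∀ t ∈ mid, bBearing kws t = false) (hk2 : bBearing kws k2 = true) :
    bScan kws (mid ++ k2 :: tail) = aDigitLoop mid := by
  induction mid with
  | nil => simp [bScan, aDigitLoop, hk2]
  | cons t ts ih =>
      simp only [List.cons_append, bScan, aDigitLoop, hmid t (by simp)]
      simp only [Bool.false_eq_true, if_false]
      rw [ih (fun x hx => hmid x (by simp [hx]))]

-- ===== VERDICT (by name: the statement is the Claim_ definition above) =====
theorem has_keyword_followed_by_digit_spec : Claim_equal_has_keyword_followed_by_digit := by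
  intro xs keywords _
  unfold Spec_has_keyword_followed_by_digit has_keyword_followed_by_digit has_keyword_followed_by_digit_alt
  set kws := keywords.map PySem.Str.lower with hkws
  simp only []
  rw [positions_eq]
  -- decompose xs at its first keyword-bearing text
  have hsplit1 := List.takeWhile_append_dropWhile (p := fun t => !bBearing kws t) (l := xs)
  set pre := xs.takeWhile (fun t => !bBearing kws t) with hpre
  have hpreF : ∀ t ∈ pre, bBearing kws t = false := by
    intro t ht
    have := List.mem_takeWhile_imp ht
    simpa using this
  cases hdw : xs.dropWhile (fun t => !bBearing kws t) with
  | nil =>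
      -- no keyword-bearing text at all
      have hxs : xs = pre := by rw [← hsplit1, hdw, List.append_nil]
      have hall : ∀ t ∈ xs, bBearing kws t = false := by rw [hxs]; exact hpreF
      rw [enumFilter_nil kws xs 0 hall]
      simp only [List.map_nil]
      exact (bFind_all_false kws xs hall).symm
  | cons k rest =>
      have hk : bBearing kws k = true := by
        have := dropWhile_head_false (fun t => !bBearing kws t) xs k rest hdw
        simpa using this
      have hxs : xs = pre ++ k :: rest := by rw [← hsplit1, hdw]
      rw [hxs, PySem.List.enumerate_append, List.filter_append,
        enumFilter_nil kws pre 0 hpreF, List.nil_append, PySem.List.enumerate_cons]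
      simp only [List.filter_cons, hk, if_true, List.map_cons]
      rw [bFind_append kws pre (k :: rest) hpreF]
      simp only [bFind, hk, if_true]
      -- decompose rest at its second keyword-bearing text
      have hsplit2 := List.takeWhile_append_dropWhile (p := fun t => !bBearing kws t) (l := rest)
      set mid := rest.takeWhile (fun t => !bBearing kws t) with hmid
      have hmidF : ∀ t ∈ mid, bBearing kws t = false := by
        intro t ht
        have := List.mem_takeWhile_imp ht
        simpa using this
      cases hdw2 : rest.dropWhile (fun t => !bBearing kws t) with
      | nil =>
          have hrest : rest = mid := by rw [← hsplit2, hdw2, List.append_nil]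
          have hallr : ∀ t ∈ rest, bBearing kws t = false := by rw [hrest]; exact hmidF
          rw [enumFilter_nil kws rest (0 + (pre.length : Int) + 1) hallr]
          simp only [List.map_nil]
          have hb : (0 : Int) + (pre.length : Int) + 1 = ((pre.length + 1 : Nat) : Int) := by
            push_cast; ring
          rw [hb, PySem.List.slice_from_natCast]
          have hdrop : (pre ++ k :: rest).drop (pre.length + 1) = rest := by
            have : pre ++ k :: rest = (pre ++ [k]) ++ rest := by simp
            rw [this]
            have hlen : pre.length + 1 = (pre ++ [k]).length := by simp
            rw [hlen, List.drop_left]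
          rw [hdrop]
          exact (bScan_all_false kws rest hallr).symm
      | cons k2 tail =>
          have hk2 : bBearing kws k2 = true := by
            have := dropWhile_head_false (fun t => !bBearing kws t) rest k2 tail hdw2
            simpa using this
          have hrest : rest = mid ++ k2 :: tail := by rw [← hsplit2, hdw2]
          rw [hrest, PySem.List.enumerate_append, List.filter_append,
            enumFilter_nil kws mid _ hmidF, List.nil_append, PySem.List.enumerate_cons]
          simp only [List.filter_cons, hk2, if_true, List.map_cons]
          have ha : (0 : Int) + (pre.length : Int) + 1 = ((pre.length + 1 : Nat) : Int) := by
            push_cast; ring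
          have hb : ((pre.length + 1 : Nat) : Int) + (mid.length : Int)
              = ((pre.length + 1 + mid.length : Nat) : Int) := by push_cast; ring
          rw [ha, hb, PySem.List.slice_natCast]
          have hdrop : (pre ++ k :: (mid ++ k2 :: tail)).drop (pre.length + 1)
              = mid ++ k2 :: tail := by
            have : pre ++ k :: (mid ++ k2 :: tail) = (pre ++ [k]) ++ (mid ++ k2 :: tail) := by simp
            rw [this]
            have hlen : pre.length + 1 = (pre ++ [k]).length := by simp
            rw [hlen, List.drop_left]
          rw [hdrop]
          have htake : (mid ++ k2 :: tail).take (pre.length + 1 + mid.length - (pre.length + 1))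
              = mid := by
            have : pre.length + 1 + mid.length - (pre.length + 1) = mid.length := by omega
            rw [this, List.take_left]
          rw [htake]
          exact (bScan_mid kws mid tail k2 hmidF hk2).symm
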